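-- pv_equiv track=rewrite | github.com/james-garner-canonical/operator-libs-linux | lib/charms/operator_libs_linux/v0/apt.py | _deb822_stanza_to_options
-- ===== SOURCE A (Python) =====
-- from typing import Any, Dict, Iterable, Iterator, List, Literal, Mapping, Optional, Tuple, Union
--
-- def _deb822_stanza_to_options(
--     lines: Iterable[Tuple[int, str]],
-- ) -> Tuple[Dict[str, str], Dict[str, int]]:
--     """Turn numbered lines into a dict of options and a dict of line numbers.
--
--     Args:
--         lines: an iterable of numbered lines (a tuple of line number and line)
--
--     Returns:
--         a dictionary of option names to (potentially multiline) values, and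
--         a dictionary of option names to starting line number
--     """
--     parts: Dict[str, List[str]] = {}
--     line_numbers: Dict[str, int] = {}
--     current = None
--     for n, line in lines:
--         assert "#" not in line  # comments should be stripped out
--         if line.startswith(" "):  # continuation of previous key's value
--             assert current is not None
--             parts[current].append(line.rstrip())  # preserve indent
--             continue
--         raw_key, _, raw_value = line.partition(":")
--         current = raw_key.strip()
--         parts[current] = [raw_value.strip()]
--         line_numbers[current] = n
--     options = {k: "\n".join(v) for k, v in parts.items()}
--     return options, line_numbers
-- ===== SOURCE B (Python) =====
-- def _deb822_stanza_to_options(lines):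
--     """Chunk the numbered lines into per-option groups (key line + its
--     continuation lines) and build each option's value in one step, instead of
--     threading a running `current` key through a line-by-line loop."""
--     numbered = list(lines)
--     for _, line in numbered:
--         assert "#" not in line  # comments should be stripped out
--     options = {}
--     line_numbers = {}
--     rest = numbered
--     while rest:
--         (n, line), rest = rest[0], rest[1:]
--         assert not line.startswith(" ")  # a continuation needs a preceding key line
--         raw_key, _, raw_value = line.partition(":")
--         key = raw_key.strip()
--         cont = []
--         while rest and rest[0][1].startswith(" "):
--             cont.append(rest[0][1].rstrip())
--             rest = rest[1:]
--         options[key] = "\n".join([raw_value.strip()] + cont)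
--         line_numbers[key] = n
--     return options, line_numbers
-- ===== Notes on version B (the rewrite author's own statement) =====
-- stated objective: alternative
-- what changed: B splits the lines into per-option chunks (a key line plus its run of continuation lines, via a takeWhile/dropWhile span) and builds each option's joined value and line number in one step, instead of A's line-by-line loop that threads a running `current` key and appends continuation lines into a dict of string lists joined at the end.
import Mathlib
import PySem

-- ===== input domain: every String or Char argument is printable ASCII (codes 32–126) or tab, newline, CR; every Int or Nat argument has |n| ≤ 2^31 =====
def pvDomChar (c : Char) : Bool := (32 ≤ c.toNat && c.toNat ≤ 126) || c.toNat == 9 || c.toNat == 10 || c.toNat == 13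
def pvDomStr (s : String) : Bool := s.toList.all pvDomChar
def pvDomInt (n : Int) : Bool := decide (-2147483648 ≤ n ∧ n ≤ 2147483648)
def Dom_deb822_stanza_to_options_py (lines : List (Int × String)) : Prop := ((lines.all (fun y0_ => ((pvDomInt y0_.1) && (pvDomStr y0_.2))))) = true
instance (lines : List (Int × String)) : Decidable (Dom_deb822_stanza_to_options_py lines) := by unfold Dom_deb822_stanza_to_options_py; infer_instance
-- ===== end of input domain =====

-- B groups the lines into per-option chunks (key line + continuation lines) and builds each
-- option's value in one step, instead of A's line-by-line loop threading a running `current` key.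

-- shared primitive: hand port of `line.partition(":")` (split at the FIRST ':'; exact — we
-- only need the before/after parts, the middle separator piece of Python's triple is unused)
def pvPartChars : List Char → List Char × List Char
  | [] => ([], [])
  | c :: cs =>
      if c = ':' then ([], cs)
      else ((pvPartChars cs).1.cons c, (pvPartChars cs).2)

def pvPartitionColon (s : String) : String × String :=
  (String.ofList (pvPartChars s.toList).1, String.ofList (pvPartChars s.toList).2)

-- ===== PORT A =====
-- state: parts (option → list of value lines), line_numbers, current key (None before any key line)
def pvALoop : List (Int × String) → PySem.Dict String (List String) → PySem.Dict String Int →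
    Option String → (List (String × String)) × (List (String × Int))
  | [], parts, lineNumbers, _ =>
      (parts.items.map (fun p => (p.1, PySem.Str.join "\n" p.2)), lineNumbers.items)
  | (n, line) :: rest, parts, lineNumbers, current =>
      -- (the Python `assert "#" not in line` raises AssertionError; those inputs are outside Pre_)
      if PySem.Str.startswith line " " then
        match current with
        | some c => pvALoop rest (parts.modify c [] (fun v => v ++ [PySem.Str.rstrip line])) lineNumbers current
        | none => pvALoop rest parts lineNumbers current  -- Python: `assert current is not None` raises; outside Pre_
      else
        pvALoop rest
          (parts.insert (PySem.Str.strip (pvPartitionColon line).1) [PySem.Str.strip (pvPartitionColon line).2])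
          (lineNumbers.insert (PySem.Str.strip (pvPartitionColon line).1) n)
          (some (PySem.Str.strip (pvPartitionColon line).1))

def deb822_stanza_to_options_py (lines : List (Int × String)) : (List (String × String)) × (List (String × Int)) :=
  pvALoop lines PySem.Dict.empty PySem.Dict.empty none

-- ===== PORT B =====
def pvIsCont (p : Int × String) : Bool := PySem.Str.startswith p.2 " "

-- chunk loop: the head line is this option's key line, the takeWhile/dropWhile pair is the
-- inner `while rest and rest[0][1].startswith(" ")` loop of Source B
def pvBLoop : List (Int × String) → PySem.Dict String String → PySem.Dict String Int →
    (List (String × String)) × (List (String × Int))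
  | [], options, lineNumbers => (options.items, lineNumbers.items)
  | (n, line) :: rest, options, lineNumbers =>
      -- (Source B's asserts raise on '#' lines and on a leading continuation line; outside Pre_)
      pvBLoop (rest.dropWhile pvIsCont)
        (options.insert (PySem.Str.strip (pvPartitionColon line).1)
          (PySem.Str.join "\n"
            (PySem.Str.strip (pvPartitionColon line).2 ::
              (rest.takeWhile pvIsCont).map (fun p => PySem.Str.rstrip p.2))))
        (lineNumbers.insert (PySem.Str.strip (pvPartitionColon line).1) n)
  termination_by l _ _ => l.length
  decreasing_by simp only [List.length_cons]; exact Nat.lt_succ_of_le (List.length_dropWhile_le _ _)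

def deb822_stanza_to_options_py_alt (lines : List (Int × String)) : (List (String × String)) × (List (String × Int)) :=
  pvBLoop lines PySem.Dict.empty PySem.Dict.empty

-- ===== PRECONDITION & SPEC =====
-- Pre_ excludes exactly the inputs where A raises AssertionError: a line containing '#',
-- or a first line that starts with ' ' (a continuation with no preceding key line).
def Pre_deb822_stanza_to_options_py (lines : List (Int × String)) : Prop :=
  (lines.all (fun p => !(PySem.Str.isIn "#" p.2))) = true ∧
  PySem.Str.startswith (lines.headD (0, "x")).2 " " = false

instance (lines : List (Int × String)) : Decidable (Pre_deb822_stanza_to_options_py lines) := by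
  unfold Pre_deb822_stanza_to_options_py; infer_instance

def pvWitness_deb822_stanza_to_options_py : (List (Int × String)) :=
  [(1, "Types: deb"), (2, "  deb-src"), (3, "URIs: http://x"), (1, "Types: again")]

def Spec_deb822_stanza_to_options_py (lines : List (Int × String)) (out : (List (String × String)) × (List (String × Int))) : Prop := out = deb822_stanza_to_options_py_alt lines
instance (lines : List (Int × String)) (out : (List (String × String)) × (List (String × Int))) : Decidable (Spec_deb822_stanza_to_options_py lines out) := by unfold Spec_deb822_stanza_to_options_py; infer_instance

-- ===== CLAIM (what is proved, stated in full; the proofs are below) =====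
def Claim_equal_deb822_stanza_to_options_py : Prop := ∀ (lines : List (Int × String)), Dom_deb822_stanza_to_options_py lines → Pre_deb822_stanza_to_options_py lines → Spec_deb822_stanza_to_options_py lines (deb822_stanza_to_options_py lines)

-- ===== LEMMAS AND PROOFS =====

theorem pv_insert_insert_self {κ ν : Type} [BEq κ] [LawfulBEq κ]
    (d : PySem.Dict κ ν) (k : κ) (v w : ν) :
    (d.insert k v).insert k w = d.insert k w := by
  apply PySem.Dict.ext
  by_cases h : d.contains k = true
  · have h' : (d.insert k v).contains k = true := by
      simp
    rw [PySem.Dict.items_insert_of_contains _ w h', PySem.Dict.items_insert_of_contains _ v h,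
        PySem.Dict.items_insert_of_contains _ w h, List.map_map]
    refine List.map_congr_left (fun p _ => ?_)
    by_cases hp : (p.1 == k) = true <;> simp [hp]
  · have hfalse : ∀ p ∈ d.items, (p.1 == k) = false := by
      intro p hp
      by_contra hc
      exact h (List.any_eq_true.2 ⟨p, hp, by revert hc; cases (p.1 == k) <;> simp⟩)
    have h' : (d.insert k v).contains k = true := by
      simp
    rw [PySem.Dict.items_insert_of_contains _ w h',
        PySem.Dict.items_insert_of_not_contains _ v (by simpa using h),
        PySem.Dict.items_insert_of_not_contains _ w (by simpa using h), List.map_append]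
    have hid : d.items.map (fun p => if (p.1 == k) = true then (k, w) else p) = d.items :=
      (List.map_congr_left (fun p hp => by simp [hfalse p hp])).trans (List.map_id _)
    simp [hid]

-- A absorbs a run of continuation lines into repeated appends on the current key;
-- collapsed, that is one insert of the whole chunk's value list.
theorem pv_absorb (cont : List (Int × String)) (hc : ∀ p ∈ cont, pvIsCont p = true) :
    ∀ (rest : List (Int × String)) (parts : PySem.Dict String (List String))
      (ln : PySem.Dict String Int) (c : String) (L : List String),
    pvALoop (cont ++ rest) (parts.insert c L) ln (some c) =
      pvALoop rest (parts.insert c (L ++ cont.map (fun p => PySem.Str.rstrip p.2))) ln (some c) := by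
  induction cont with
  | nil => intro rest parts ln c L; simp
  | cons p ps ih =>
    intro rest parts ln c L
    obtain ⟨n, line⟩ := p
    have hp : PySem.Str.startswith line " " = true := hc (n, line) (List.mem_cons_self)
    simp only [List.cons_append, pvALoop, hp, if_pos]
    have hmod : ((parts.insert c L).modify c [] (fun v => v ++ [PySem.Str.rstrip line])) =
        parts.insert c (L ++ [PySem.Str.rstrip line]) := by
      simp only [PySem.Dict.modify, PySem.Dict.getD_insert_self, pv_insert_insert_self]
    rw [hmod, ih (fun q hq => hc q (List.mem_cons_of_mem _ hq))]
    simp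

-- mapping `"\n".join` over the values commutes with insert
def pvJoinDict (d : PySem.Dict String (List String)) : PySem.Dict String String :=
  PySem.Dict.mk (d.items.map (fun p => (p.1, PySem.Str.join "\n" p.2)))

theorem pv_contains_joinDict (d : PySem.Dict String (List String)) (k : String) :
    (pvJoinDict d).contains k = d.contains k := by
  simp [pvJoinDict, PySem.Dict.contains, List.any_map, Function.comp_def]

theorem pv_joinDict_insert (d : PySem.Dict String (List String)) (k : String) (L : List String) :
    pvJoinDict (d.insert k L) = (pvJoinDict d).insert k (PySem.Str.join "\n" L) := by
  apply PySem.Dict.ext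
  by_cases h : d.contains k = true
  · have h' : (pvJoinDict d).contains k = true := by rw [pv_contains_joinDict]; exact h
    have e1 : (d.insert k L).items =
        d.items.map (fun p => if (p.1 == k) = true then (k, L) else p) :=
      PySem.Dict.items_insert_of_contains _ L h
    have e2 : ((pvJoinDict d).insert k (PySem.Str.join "\n" L)).items =
        (pvJoinDict d).items.map
          (fun p => if (p.1 == k) = true then (k, PySem.Str.join "\n" L) else p) :=
      PySem.Dict.items_insert_of_contains _ _ h'
    rw [show (pvJoinDict (d.insert k L)).items =
        ((d.insert k L).items.map (fun p => (p.1, PySem.Str.join "\n" p.2))) from rfl, e2, e1]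
    simp only [pvJoinDict, List.map_map]
    refine List.map_congr_left (fun p _ => ?_)
    by_cases hp : p.1 = k <;> simp [hp]
  · have h' : (pvJoinDict d).contains k = false := by
      rw [pv_contains_joinDict]; simpa using h
    have e1 : (d.insert k L).items = d.items ++ [(k, L)] :=
      PySem.Dict.items_insert_of_not_contains _ L (by simpa using h)
    have e2 : ((pvJoinDict d).insert k (PySem.Str.join "\n" L)).items =
        (pvJoinDict d).items ++ [(k, PySem.Str.join "\n" L)] :=
      PySem.Dict.items_insert_of_not_contains _ _ h'
    rw [show (pvJoinDict (d.insert k L)).items =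
        ((d.insert k L).items.map (fun p => (p.1, PySem.Str.join "\n" p.2))) from rfl, e2, e1]
    simp [pvJoinDict]

theorem pv_loops_agree (N : Nat) :
    ∀ (lines : List (Int × String)), lines.length ≤ N →
    ∀ (parts : PySem.Dict String (List String)) (ln : PySem.Dict String Int) (cur : Option String),
    pvIsCont (lines.headD (0, "x")) = false →
    pvALoop lines parts ln cur = pvBLoop lines (pvJoinDict parts) ln := by
  induction N with
  | zero =>
    intro lines hlen parts ln cur _
    have : lines = [] := List.length_eq_zero_iff.1 (Nat.le_zero.1 hlen)
    subst this
    simp [pvALoop, pvBLoop, pvJoinDict]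
  | succ M ih =>
    intro lines hlen parts ln cur hhead
    cases lines with
    | nil => simp [pvALoop, pvBLoop, pvJoinDict]
    | cons hd rest =>
      obtain ⟨n, line⟩ := hd
      have hline : PySem.Str.startswith line " " = false := by simpa [pvIsCont] using hhead
      simp only [pvALoop, hline, Bool.false_eq_true, if_false]
      have hsplit : rest.takeWhile pvIsCont ++ rest.dropWhile pvIsCont = rest :=
        List.takeWhile_append_dropWhile
      conv_lhs => rw [← hsplit]
      rw [pv_absorb (rest.takeWhile pvIsCont) (fun q hq => List.mem_takeWhile_imp hq)]
      have hlen' : (rest.dropWhile pvIsCont).length ≤ M := by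
        have h1 := List.length_dropWhile_le pvIsCont rest
        have h2 : rest.length + 1 ≤ M + 1 := by simpa using hlen
        omega
      have hhead' : pvIsCont ((rest.dropWhile pvIsCont).headD (0, "x")) = false := by
        cases hdw : rest.dropWhile pvIsCont with
        | nil => decide
        | cons q qs =>
          have := List.head_dropWhile_not pvIsCont (l := rest) (by simp [hdw])
          simpa [hdw] using this
      rw [ih _ hlen' _ (ln.insert (PySem.Str.strip (pvPartitionColon line).1) n) _ hhead',
          pv_joinDict_insert]
      simp only [pvBLoop]
      simp

-- ===== VERDICT (by name: the statement is the Claim_ definition above) =====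
theorem deb822_stanza_to_options_py_spec : Claim_equal_deb822_stanza_to_options_py := by
  intro lines _ hpre
  unfold Spec_deb822_stanza_to_options_py deb822_stanza_to_options_py deb822_stanza_to_options_py_alt
  have hhead : pvIsCont (lines.headD (0, "x")) = false := by
    simpa [pvIsCont] using hpre.2
  have : pvJoinDict PySem.Dict.empty = (PySem.Dict.empty : PySem.Dict String String) := rfl
  rw [pv_loops_agree lines.length lines le_rfl PySem.Dict.empty PySem.Dict.empty none hhead, this]
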